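-- pv_equiv track=rewrite | github.com/necrosato/AdventOfCode | 2024/day25/solution.py | heights
-- ===== SOURCE A (Python) =====
-- def heights(schematic, lock=True):
--     h = [0]*len(schematic[0])
--     s = schematic
--     if not lock:
--         s = reversed(schematic)
--     for i, r in enumerate(s, start=0):
--         for j, c in enumerate(r):
--             if c == '#':
--                 h[j] = i
--     return h
-- ===== SOURCE B (Python) =====
-- def heights(schematic, lock=True):
--     s = schematic if lock else schematic[::-1]
--     return [max((i for i, r in enumerate(s) if j < len(r) and r[j] == '#'), default=0)
--             for j in range(len(schematic[0]))]
-- ===== Notes on version B (the rewrite author's own statement) =====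
-- stated objective: idiomatic
-- what changed: A scans the grid row-major and keeps overwriting a mutable height array; B builds the result directly as a list comprehension over columns, taking max() of the matching row indices per column (default 0), with no mutable state.
import Mathlib
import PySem

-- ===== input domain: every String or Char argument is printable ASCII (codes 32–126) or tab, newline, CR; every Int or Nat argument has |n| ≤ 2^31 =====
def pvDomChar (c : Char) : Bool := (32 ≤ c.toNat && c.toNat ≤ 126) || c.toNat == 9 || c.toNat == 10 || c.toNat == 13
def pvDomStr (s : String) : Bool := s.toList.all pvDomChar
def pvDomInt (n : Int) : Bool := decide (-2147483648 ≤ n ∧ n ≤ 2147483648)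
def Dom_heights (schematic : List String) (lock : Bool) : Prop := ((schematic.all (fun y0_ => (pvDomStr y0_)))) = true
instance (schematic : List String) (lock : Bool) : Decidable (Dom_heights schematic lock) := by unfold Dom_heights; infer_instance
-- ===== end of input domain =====

-- B replaces A's row-major overwrite of a mutable height array by a per-column
-- max of the matching row indices (objective: idiomatic; same asymptotic cost).

-- ===== PORT A =====
def heights (schematic : List String) (lock : Bool) : List Int :=
  match schematic.head? with
  | none => []          -- Python: schematic[0] raises IndexError here (excluded by Pre_)
  | some r0 =>
    -- h = [0]*len(schematic[0]); s = schematic, reversed if not lock; then the two loops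
    (PySem.List.enumerate (if lock then schematic else schematic.reverse) 0).foldl
      (fun h p =>
        (PySem.List.enumerate p.2.toList 0).foldl
          (fun h q => if q.2 = '#' then h.set q.1.toNat p.1 else h) h)
      (List.replicate r0.length 0)
    -- h[j] = i : Python raises IndexError when j ≥ len(h); Pre_ excludes those inputs

-- ===== PORT B =====
def heights_alt (schematic : List String) (lock : Bool) : List Int :=
  match schematic.head? with
  | none => []          -- Python: len(schematic[0]) raises IndexError here (excluded by Pre_)
  | some r0 =>
    -- s = schematic if lock else schematic[::-1]; one max(...) per column j
    (PySem.List.pyRange 0 r0.length 1).map (fun j =>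
      (PySem.List.max?
        ((PySem.List.enumerate (if lock then schematic else schematic.reverse) 0).filterMap
          (fun p => if j < (p.2.length : Int) ∧ PySem.Str.pyGet? p.2 j = some '#'
                    then some p.1 else none))
        (fun x => x)).getD 0)      -- max(..., default=0)

-- ===== PRECONDITION & SPEC =====
-- Pre_ excludes exactly the inputs where Python A raises IndexError: the empty list
-- (schematic[0]) and schematics in which some row carries '#' at a column index
-- ≥ len(schematic[0]) (the write h[j] = i is out of range).
def Pre_heights (schematic : List String) (lock : Bool) : Prop :=
  schematic ≠ [] ∧ (schematic.all (fun r =>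
    (r.toList.drop (schematic.headD "").toList.length).all (fun c => c != '#'))) = true
instance (schematic : List String) (lock : Bool) : Decidable (Pre_heights schematic lock) := by
  unfold Pre_heights; infer_instance

def pvWitness_heights : List String × Bool := (["#.", ".#", "##"], true)

def Spec_heights (schematic : List String) (lock : Bool) (out : List Int) : Prop := out = heights_alt schematic lock
instance (schematic : List String) (lock : Bool) (out : List Int) : Decidable (Spec_heights schematic lock out) := by unfold Spec_heights; infer_instance

-- ===== CLAIM (what is proved, stated in full; the proofs are below) =====
def Claim_equal_heights : Prop := ∀ (schematic : List String) (lock : Bool), Dom_heights schematic lock → Pre_heights schematic lock → Spec_heights schematic lock (heights schematic lock)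

-- ===== LEMMAS AND PROOFS =====

def hitB (r : String) (j : Nat) : Bool := r.toList[j]? == some '#'

def lastHitFrom (rows : List String) (k : Int) (j : Nat) (acc : Int) : Int :=
  match rows with
  | [] => acc
  | r :: t => lastHitFrom t (k + 1) j (if hitB r j then k else acc)

theorem inner_len (qs : List (Int × Char)) (i : Int) (h : List Int) :
    (qs.foldl (fun h q => if q.2 = '#' then h.set q.1.toNat i else h) h).length = h.length := by
  induction qs generalizing h with
  | nil => rfl
  | cons q t ih => simp only [List.foldl_cons]; rw [ih]; split <;> simp

theorem inner_get (cs : List Char) (k : Nat) (h : List Int) (i : Int) (j : Nat) :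
    ((PySem.List.enumerate cs (k : Int)).foldl
        (fun h q => if q.2 = '#' then h.set q.1.toNat i else h) h)[j]? =
      if k ≤ j ∧ j < h.length ∧ cs[j - k]? = some '#' then some i else h[j]? := by
  induction cs generalizing k h with
  | nil => simp [PySem.List.enumerate_nil]
  | cons c t ih =>
    rw [PySem.List.enumerate_cons]
    simp only [List.foldl_cons]
    have hcast : ((k : Int) + 1) = ((k + 1 : Nat) : Int) := by push_cast; ring
    rw [hcast, ih]
    have hlen : (if c = '#' then h.set ((k : Int)).toNat i else h).length = h.length := by
      split <;> simp
    have hget : (if c = '#' then h.set ((k : Int)).toNat i else h)[j]? =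
        if j = k ∧ c = '#' ∧ j < h.length then some i else h[j]? := by
      rw [Int.toNat_natCast]
      by_cases hc : c = '#'
      · rw [if_pos hc, List.getElem?_set]
        by_cases hjk : k = j
        · subst hjk
          by_cases hjl : k < h.length
          · rw [if_pos rfl, if_pos hjl, if_pos ⟨rfl, hc, hjl⟩]
          · rw [if_pos rfl, if_neg hjl, if_neg (fun hh => hjl hh.2.2),
              List.getElem?_eq_none (by omega)]
        · rw [if_neg hjk, if_neg (fun hh => hjk hh.1.symm)]
      · rw [if_neg hc, if_neg (fun hh => hc hh.2.1)]
    rw [hlen, hget]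
    rcases Nat.lt_trichotomy j k with hjk | hjk | hjk
    · rw [if_neg (fun hh => absurd hh.1 (by omega) :
          ¬ (k + 1 ≤ j ∧ j < h.length ∧ t[j - (k + 1)]? = some '#')),
        if_neg (fun hh => absurd hh.1 (by omega) : ¬ (j = k ∧ c = '#' ∧ j < h.length)),
        if_neg (fun hh => absurd hh.1 (by omega) :
          ¬ (k ≤ j ∧ j < h.length ∧ (c :: t)[j - k]? = some '#'))]
    · subst hjk
      rw [if_neg (fun hh => absurd hh.1 (by omega) :
          ¬ (j + 1 ≤ j ∧ j < h.length ∧ t[j - (j + 1)]? = some '#')), Nat.sub_self]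
      by_cases hc : c = '#'
      · by_cases hjl : j < h.length
        · rw [if_pos ⟨rfl, hc, hjl⟩, if_pos ⟨le_rfl, hjl, by simp [hc]⟩]
        · rw [if_neg (fun hh => hjl hh.2.2), if_neg (fun hh => hjl hh.2.1)]
      · rw [if_neg (fun hh => hc hh.2.1), if_neg (fun hh => hc (by simpa using hh.2.2))]
    · have hsub : j - k = (j - (k + 1)) + 1 := by omega
      have hel : (c :: t)[j - k]? = t[j - (k + 1)]? := by rw [hsub]; simp
      rw [if_neg (fun hh => absurd hh.1 (by omega) : ¬ (j = k ∧ c = '#' ∧ j < h.length)), hel]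
      by_cases hcond : j < h.length ∧ t[j - (k + 1)]? = some '#'
      · rw [if_pos ⟨by omega, hcond.1, hcond.2⟩, if_pos ⟨by omega, hcond.1, hcond.2⟩]
      · rw [if_neg (fun hh => hcond ⟨hh.2.1, hh.2.2⟩), if_neg (fun hh => hcond ⟨hh.2.1, hh.2.2⟩)]

theorem outer_len (rows : List (Int × String)) (h : List Int) :
    (rows.foldl (fun h p =>
        (PySem.List.enumerate p.2.toList 0).foldl
          (fun h q => if q.2 = '#' then h.set q.1.toNat p.1 else h) h) h).length = h.length := by
  induction rows generalizing h with
  | nil => rfl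
  | cons p t ih => simp only [List.foldl_cons]; rw [ih, inner_len]

theorem outer_get (rows : List String) (k : Int) (h : List Int) (j : Nat) (v : Int)
    (hv : h[j]? = some v) :
    ((PySem.List.enumerate rows k).foldl (fun h p =>
        (PySem.List.enumerate p.2.toList 0).foldl
          (fun h q => if q.2 = '#' then h.set q.1.toNat p.1 else h) h) h)[j]? =
      some (lastHitFrom rows k j v) := by
  induction rows generalizing k h v with
  | nil =>
    simp only [PySem.List.enumerate_nil, List.foldl_nil, lastHitFrom]
    exact hv
  | cons r t ih =>
    rw [PySem.List.enumerate_cons]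
    simp only [List.foldl_cons]
    obtain ⟨hj, -⟩ := List.getElem?_eq_some_iff.mp hv
    have hinner := inner_get r.toList 0 h k j
    have hstep : ((PySem.List.enumerate r.toList 0).foldl
        (fun h q => if q.2 = '#' then h.set q.1.toNat k else h) h)[j]? =
        some (if hitB r j then k else v) := by
      rw [show ((0 : Int)) = ((0 : Nat) : Int) from rfl, hinner]
      simp only [Nat.zero_le, true_and, hj, Nat.sub_zero, hitB]
      by_cases hh : r.toList[j]? = some '#'
      · simp [hh]
      · simp [hh, hv]
    rw [show lastHitFrom (r :: t) k j v = lastHitFrom t (k + 1) j (if hitB r j then k else v)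
        from rfl]
    exact ih (k + 1) _ _ hstep

def colCond (j : Nat) (p : Int × String) : Option Int :=
  if (j : Int) < (p.2.length : Int) ∧ PySem.Str.pyGet? p.2 ((j : Nat) : Int) = some '#'
  then some p.1 else none

theorem colCond_eq (j : Nat) (p : Int × String) :
    colCond j p = if hitB p.2 j then some p.1 else none := by
  unfold colCond hitB
  have hbr : PySem.Str.pyGet? p.2 ((j : Nat) : Int) = p.2.toList[j]? := by
    simp [PySem.Str.pyGet?, PySem.List.pyGet?_natCast]
  by_cases hh : p.2.toList[j]? = some '#'
  · obtain ⟨hjl, -⟩ := List.getElem?_eq_some_iff.mp hh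
    rw [String.length_toList] at hjl
    have hlen : ((j : Nat) : Int) < ((p.2.length : Nat) : Int) := by exact_mod_cast hjl
    rw [if_pos ⟨hlen, by rw [hbr]; exact hh⟩, if_pos (by simp [hh])]
  · rw [if_neg (fun hc => hh (hbr ▸ hc.2)), if_neg (by simp [hh])]

theorem filterMax_eq (rows : List String) (k : Int) (j : Nat) (acc : Int) (hak : acc ≤ k) :
    (((PySem.List.enumerate rows k).filterMap (colCond j)).foldl max acc) =
      lastHitFrom rows k j acc := by
  induction rows generalizing k acc with
  | nil => simp [PySem.List.enumerate_nil, lastHitFrom]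
  | cons r t ih =>
    rw [PySem.List.enumerate_cons,
      show lastHitFrom (r :: t) k j acc = lastHitFrom t (k + 1) j (if hitB r j then k else acc)
        from rfl]
    by_cases hh : hitB r j
    · have hfa : colCond j (k, r) = some k := by rw [colCond_eq]; simp [hh]
      simp only [List.filterMap_cons, hfa, List.foldl_cons]
      rw [if_pos hh, max_eq_right hak]
      exact ih (k + 1) k (by omega)
    · have hfa : colCond j (k, r) = none := by rw [colCond_eq]; simp [hh]
      simp only [List.filterMap_cons, hfa]
      rw [if_neg hh]
      exact ih (k + 1) acc (by omega)

theorem max_getD (l : List Int) (hl : ∀ x ∈ l, (0 : Int) ≤ x) :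
    (PySem.List.max? l (fun x => x)).getD 0 = l.foldl max 0 := by
  cases l with
  | nil => simp [PySem.List.max?]
  | cons x t =>
    rw [PySem.List.max?_id_cons, Option.getD_some, List.foldl_cons,
      max_eq_right (hl x (by simp))]

theorem heights_eq (schematic : List String) (lock : Bool) :
    heights schematic lock = heights_alt schematic lock := by
  cases schematic with
  | nil => rfl
  | cons r0 t =>
    unfold heights heights_alt
    simp only [List.head?_cons]
    generalize (if lock then (r0 :: t) else (r0 :: t).reverse) = s
    apply List.ext_getElem?
    intro j
    by_cases hj : j < r0.length
    · have hh0 : (List.replicate r0.length (0 : Int))[j]? = some 0 := by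
        simp [hj]
      rw [outer_get s 0 _ j 0 hh0]
      rw [show ((PySem.List.pyRange 0 (r0.length : Int) 1).map (fun j =>
          (PySem.List.max? ((PySem.List.enumerate s 0).filterMap
            (fun p => if j < (p.2.length : Int) ∧ PySem.Str.pyGet? p.2 j = some '#'
                      then some p.1 else none)) (fun x => x)).getD 0))[j]? =
          some ((PySem.List.max? ((PySem.List.enumerate s 0).filterMap (colCond j))
            (fun x => x)).getD 0) from by
        rw [PySem.List.getElem?_map_pyRange_zero _ r0.length j hj]; rfl]
      have hnn : ∀ x ∈ (PySem.List.enumerate s 0).filterMap (colCond j), (0 : Int) ≤ x := by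
        intro x hx
        rcases List.mem_filterMap.mp hx with ⟨p, hp, hpx⟩
        rcases (PySem.List.mem_enumerate_iff _ _ _).mp hp with ⟨kk, hkk, rfl⟩
        rw [colCond_eq] at hpx
        split at hpx
        · injection hpx with hx'
          subst hx'
          simp
        · simp at hpx
      rw [max_getD _ hnn, filterMax_eq s 0 j 0 le_rfl]
    · rw [List.getElem?_eq_none
          (by rw [outer_len, List.length_replicate]; omega),
        List.getElem?_eq_none
          (by rw [List.length_map, PySem.List.length_pyRange_one]; omega)]

-- ===== VERDICT (by name: the statement is the Claim_ definition above) =====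
theorem heights_spec : Claim_equal_heights := by
  intro schematic lock _ _
  unfold Spec_heights
  exact heights_eq schematic lock
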